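-- pv_equiv track=rewrite | github.com/mjochen/some_simple_games | MasterMind/functions.py | colors_sure_of
-- ===== SOURCE A (Python) =====
-- def colors_sure_of(possibles):
--     colors = list(possibles[0])
--     for possible in possibles:
--         test = colors.copy()
--         for color in colors:
--             if color not in possible:
--                 test.remove(color)
--         if len(test) == 0:
--             return []
--         colors = test
--     return colors
-- ===== SOURCE B (Python) =====
-- def colors_sure_of(possibles):
--     n = len(possibles)
--     count = {}
--     for p in possibles:
--         for c in set(p):
--             count[c] = count.get(c, 0) + 1
--     return [c for c in possibles[0] if count.get(c, 0) == n]
-- ===== Notes on version B (the rewrite author's own statement) =====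
-- stated objective: alternative
-- what changed: B counts, in one dict pass over the distinct characters of every possibility, how many possibilities contain each character, then keeps the characters of possibles[0] whose count equals len(possibles), instead of A's repeated copy-and-remove narrowing of a candidate list.
import Mathlib
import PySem

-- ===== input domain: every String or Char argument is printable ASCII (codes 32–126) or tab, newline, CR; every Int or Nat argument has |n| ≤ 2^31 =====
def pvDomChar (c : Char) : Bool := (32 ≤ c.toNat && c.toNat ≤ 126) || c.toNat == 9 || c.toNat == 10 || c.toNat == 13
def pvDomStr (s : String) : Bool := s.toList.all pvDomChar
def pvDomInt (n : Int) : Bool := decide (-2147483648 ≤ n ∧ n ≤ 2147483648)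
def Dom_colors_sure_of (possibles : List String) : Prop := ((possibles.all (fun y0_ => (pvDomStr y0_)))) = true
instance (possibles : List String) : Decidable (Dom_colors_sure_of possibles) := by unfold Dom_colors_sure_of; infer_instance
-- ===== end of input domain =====

-- B counts in one dict pass how many possibilities contain each distinct character and then keeps
-- the characters of possibles[0] whose count equals len(possibles), instead of A's repeated
-- copy-and-remove narrowing of a candidate list (objective: alternative).

-- ===== PORT A =====
-- test.remove(color): Python's ValueError branch (remove? = none) is unreachable here, since
-- every removed occurrence is drawn from a copy of test; .getD t keeps the function total.
def csoRemove (t : List Char) (c : Char) : List Char :=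
  (PySem.List.remove? t c).getD t

-- inner loop: 'for color in colors: if color not in possible: test.remove(color)'
def csoInner (test : List Char) (colors : List Char) (possible : String) : List Char :=
  match colors with
  | [] => test
  | c :: cs =>
      if PySem.Chars.isIn [c] possible.toList then csoInner test cs possible
      else csoInner (csoRemove test c) cs possible

-- outer loop with the early 'return []'
def csoOuter (colors : List Char) (ps : List String) : List Char :=
  match ps with
  | [] => colors
  | p :: rest =>
      let test := csoInner colors colors p
      if test.length = 0 then [] else csoOuter test rest

def colors_sure_of (possibles : List String) : List String :=
  match PySem.List.pyGet? possibles 0 with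
  | none => []   -- Python raises IndexError here; excluded by Pre_
  | some s => (csoOuter s.toList possibles).map (fun c => String.ofList [c])

-- ===== PORT B =====
-- count[c] = count.get(c, 0) + 1, looped over set(p) for every p (counting is order-independent,
-- so Python's arbitrary set-iteration order does not affect count)
def csoCount (possibles : List String) : PySem.Dict Char Int :=
  possibles.foldl
    (fun d p => (PySem.Set.ofList p.toList).foldl
        (fun d c => PySem.Dict.insert d c (PySem.Dict.getD d c 0 + 1)) d)
    PySem.Dict.empty

def colors_sure_of_alt (possibles : List String) : List String :=
  let n : Int := (possibles.length : Int)
  let count := csoCount possibles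
  match PySem.List.pyGet? possibles 0 with
  | none => []   -- Python raises IndexError here; excluded by Pre_
  | some s =>
      (s.toList.filter (fun c => PySem.Dict.getD count c 0 == n)).map
        (fun c => String.ofList [c])

-- ===== PRECONDITION & SPEC =====
-- A evaluates possibles[0], which raises IndexError on the empty list: Pre_ excludes only that.
def Pre_colors_sure_of (possibles : List String) : Prop := possibles ≠ []
instance (possibles : List String) : Decidable (Pre_colors_sure_of possibles) := by
  unfold Pre_colors_sure_of; infer_instance

def pvWitness_colors_sure_of : List String := ["aab", "ba"]

def Spec_colors_sure_of (possibles : List String) (out : List String) : Prop := out = colors_sure_of_alt possibles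
instance (possibles : List String) (out : List String) : Decidable (Spec_colors_sure_of possibles out) := by unfold Spec_colors_sure_of; infer_instance

-- ===== CLAIM (what is proved, stated in full; the proofs are below) =====
def Claim_equal_colors_sure_of : Prop := ∀ (possibles : List String), Dom_colors_sure_of possibles → Pre_colors_sure_of possibles → Spec_colors_sure_of possibles (colors_sure_of possibles)

-- ===== LEMMAS AND PROOFS =====

-- 'c in possible' on a one-character string is character membership
theorem isIn_singleton (c : Char) (l : List Char) :
    PySem.Chars.isIn [c] l = l.contains c := by
  by_cases h : c ∈ l
  · obtain ⟨pre, suf, rfl⟩ := List.append_of_mem h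
    rw [(PySem.Chars.isIn_iff_infix _ _).mpr ⟨pre, suf, by simp⟩]
    simp [h]
  · have hni : ¬ ([c] <:+: l) := fun hinf => h (hinf.subset (by simp))
    rw [(PySem.Chars.isIn_eq_false_iff _ _).mpr hni]
    simp [h]

theorem remove_append_not_mem (l₁ l₂ : List Char) (c : Char) (h : c ∉ l₁) :
    csoRemove (l₁ ++ c :: l₂) c = l₁ ++ l₂ := by
  induction l₁ with
  | nil => simp [csoRemove]
  | cons x xs ih =>
      have hx : x ≠ c := by intro hx; exact h (by simp [hx])
      have hxs : c ∉ xs := fun hm => h (by simp [hm])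
      have hih := ih hxs
      simp only [csoRemove] at hih ⊢
      rw [List.cons_append, PySem.List.remove?_cons_of_ne _ hx]
      cases hr : PySem.List.remove? (xs ++ c :: l₂) c with
      | none =>
          exact absurd ((PySem.List.remove?_eq_none_iff _ _).mp hr) (by simp)
      | some t =>
          rw [hr] at hih
          simp only [Option.getD_some] at hih
          simp [hih]

-- the inner loop filters: removing each non-member occurrence from a fresh copy is a filter
theorem inner_filter (p : String) (done cs : List Char) :
    csoInner ((done.filter (fun c => PySem.Chars.isIn [c] p.toList)) ++ cs) cs p
      = (done ++ cs).filter (fun c => PySem.Chars.isIn [c] p.toList) := by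
  induction cs generalizing done with
  | nil => simp [csoInner]
  | cons c cs ih =>
      by_cases hc : PySem.Chars.isIn [c] p.toList
      · have h1 : (done.filter (fun c => PySem.Chars.isIn [c] p.toList)) ++ c :: cs
            = ((done ++ [c]).filter (fun c => PySem.Chars.isIn [c] p.toList)) ++ cs := by
          simp [List.filter_append, hc]
        simp only [csoInner, hc, if_true, h1, ih (done ++ [c])]
        simp
      · have hnm : c ∉ done.filter (fun c => PySem.Chars.isIn [c] p.toList) := by
          intro hm
          exact hc (List.mem_filter.mp hm).2
        have h1 : csoRemove ((done.filter (fun c => PySem.Chars.isIn [c] p.toList)) ++ c :: cs) c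
            = (done.filter (fun c => PySem.Chars.isIn [c] p.toList)) ++ cs :=
          remove_append_not_mem _ _ _ hnm
        have h2 : (done.filter (fun c => PySem.Chars.isIn [c] p.toList)) ++ cs
            = ((done ++ [c]).filter (fun c => PySem.Chars.isIn [c] p.toList)) ++ cs := by
          simp [List.filter_append, hc]
        simp only [csoInner, hc, h1, h2, ih (done ++ [c])]
        simp [List.filter_append, hc]

theorem inner_filter' (p : String) (colors : List Char) :
    csoInner colors colors p = colors.filter (fun c => PySem.Chars.isIn [c] p.toList) := by
  simpa using inner_filter p [] colors

-- the outer loop computes the filter by membership in every possibility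
theorem outer_filter (ps : List String) (colors : List Char) :
    csoOuter colors ps
      = colors.filter (fun c => ps.all (fun p => PySem.Chars.isIn [c] p.toList)) := by
  induction ps generalizing colors with
  | nil => simp [csoOuter]
  | cons p rest ih =>
      have hsplit : colors.filter (fun c => (p :: rest).all (fun q => PySem.Chars.isIn [c] q.toList))
          = (colors.filter (fun c => PySem.Chars.isIn [c] p.toList)).filter
              (fun c => rest.all (fun q => PySem.Chars.isIn [c] q.toList)) := by
        rw [List.filter_filter]
        exact List.filter_congr (fun c _ => by simp [Bool.and_comm])
      by_cases he : colors.filter (fun c => PySem.Chars.isIn [c] p.toList) = []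
      · simp only [csoOuter, inner_filter', he, List.length_nil, if_true, hsplit]
        simp
      · have hlen : ¬ (colors.filter (fun c => PySem.Chars.isIn [c] p.toList)).length = 0 := by
          simpa [List.length_eq_zero_iff] using he
        simp only [csoOuter, inner_filter', hlen, if_false, hsplit, ih]

-- B's counting dict: getD c 0 is the number of possibilities containing c
theorem getD_csoCount_aux (ps : List String) (d : PySem.Dict Char Int) (c : Char) :
    (ps.foldl
      (fun d p => (PySem.Set.ofList p.toList).foldl
          (fun d c => PySem.Dict.insert d c (PySem.Dict.getD d c 0 + 1)) d) d).getD c 0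
      = d.getD c 0 + (ps.countP (fun p => p.toList.contains c) : Int) := by
  induction ps generalizing d with
  | nil => simp
  | cons p rest ih =>
      simp only [List.foldl_cons, ih, PySem.Dict.getD_foldl_insert_add_one]
      have hcnt : ((PySem.Set.ofList p.toList).count c : Int)
          = if p.toList.contains c then 1 else 0 := by
        by_cases hm : c ∈ p.toList
        · rw [List.count_eq_one_of_mem (PySem.Set.nodup_ofList _)
              ((PySem.Set.mem_ofList _ _).mpr hm)]
          simp [hm]
        · rw [List.count_eq_zero.mpr (fun h => hm ((PySem.Set.mem_ofList _ _).mp h))]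
          simp [hm]
      rw [hcnt, List.countP_cons]
      by_cases hm : c ∈ p.toList <;> simp [hm] <;> ring

theorem getD_csoCount (ps : List String) (c : Char) :
    (csoCount ps).getD c 0 = (ps.countP (fun p => p.toList.contains c) : Int) := by
  unfold csoCount
  rw [getD_csoCount_aux]
  simp

-- ===== VERDICT (by name: the statement is the Claim_ definition above) =====
theorem colors_sure_of_spec : Claim_equal_colors_sure_of := by
  intro possibles _ hpre
  unfold Spec_colors_sure_of
  unfold colors_sure_of colors_sure_of_alt
  cases possibles with
  | nil => exact absurd rfl hpre
  | cons s rest =>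
      rw [PySem.List.pyGet?_zero_cons]
      simp only [outer_filter]
      congr 1
      refine List.filter_congr (fun c _ => ?_)
      have hcount := getD_csoCount (s :: rest) c
      rw [hcount]
      by_cases hall : ∀ p ∈ (s :: rest), c ∈ p.toList
      · have h1 : (s :: rest).all (fun p => PySem.Chars.isIn [c] p.toList) = true := by
          rw [List.all_eq_true]
          intro p hp
          rw [isIn_singleton]
          simpa using hall p hp
        have h2 : (s :: rest).countP (fun p => p.toList.contains c) = (s :: rest).length := by
          rw [List.countP_eq_length]
          intro p hp
          simpa using hall p hp
        rw [h1, h2]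
        simp
      · obtain ⟨p, hp, hcp⟩ := not_forall₂.mp hall
        have h1 : (s :: rest).all (fun p => PySem.Chars.isIn [c] p.toList) = false := by
          rw [List.all_eq_false]
          exact ⟨p, hp, by rw [isIn_singleton]; simpa using hcp⟩
        have h2 : (s :: rest).countP (fun p => p.toList.contains c) < (s :: rest).length := by
          refine lt_of_le_of_ne List.countP_le_length (fun he => hcp ?_)
          have := List.countP_eq_length.mp he p hp
          simpa using this
        rw [h1]
        have h2' : List.countP (fun p => decide (c ∈ p.toList)) (s :: rest) < rest.length + 1 := by
          simpa using h2
        have h3 : ((List.countP (fun p => decide (c ∈ p.toList)) (s :: rest) : Int))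
            ≠ (rest.length : Int) + 1 := by omega
        simp [h3]
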